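-- pv_equiv track=rewrite | github.com/miliar/Code_Jam_Webscraper | solutions_python/Problem_96/1167.py | max_at_least_p
-- ===== SOURCE A (Python) =====
-- def best_suprising(score):
--     if score == 0:
--         return 0
--     div3 = score // 3
--     mod3 = score % 3
--     if mod3 == 0 or mod3 == 1:
--         return div3+1
--     elif mod3 == 2:
--         return div3+2
--
-- def best_unsuprising(score):
--     div3 = score // 3
--     if score % 3 == 0:
--         return div3
--     else:
--         return div3+1
--
-- def max_at_least_p(S, p, scores):
--     count = 0
--     for score in scores:
--         if best_unsuprising(score) >= p:
--             count += 1
--         elif best_suprising(score) >= p and S > 0: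
--             count += 1
--             S -= 1
--     return count
-- ===== SOURCE B (Python) =====
-- def best_suprising(score):
--     if score == 0:
--         return 0
--     div3 = score // 3
--     mod3 = score % 3
--     if mod3 == 0 or mod3 == 1:
--         return div3+1
--     elif mod3 == 2:
--         return div3+2
--
-- def best_unsuprising(score):
--     div3 = score // 3
--     if score % 3 == 0:
--         return div3
--     else:
--         return div3+1
--
-- def max_at_least_p(S, p, scores):
--     count_sure = sum(1 for score in scores if best_unsuprising(score) >= p)
--     count_need = sum(1 for score in scores
--                      if best_unsuprising(score) < p and best_suprising(score) >= p)
--     return count_sure + min(count_need, max(S, 0))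
-- ===== Notes on version B (the rewrite author's own statement) =====
-- stated objective: alternative
-- what changed: Replaces the stateful greedy loop that decrements the surprise budget S in order with an order-independent count-then-clamp: count the sure scores and the scores needing a surprise, then add min(count_need, max(S,0)).
import Mathlib
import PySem

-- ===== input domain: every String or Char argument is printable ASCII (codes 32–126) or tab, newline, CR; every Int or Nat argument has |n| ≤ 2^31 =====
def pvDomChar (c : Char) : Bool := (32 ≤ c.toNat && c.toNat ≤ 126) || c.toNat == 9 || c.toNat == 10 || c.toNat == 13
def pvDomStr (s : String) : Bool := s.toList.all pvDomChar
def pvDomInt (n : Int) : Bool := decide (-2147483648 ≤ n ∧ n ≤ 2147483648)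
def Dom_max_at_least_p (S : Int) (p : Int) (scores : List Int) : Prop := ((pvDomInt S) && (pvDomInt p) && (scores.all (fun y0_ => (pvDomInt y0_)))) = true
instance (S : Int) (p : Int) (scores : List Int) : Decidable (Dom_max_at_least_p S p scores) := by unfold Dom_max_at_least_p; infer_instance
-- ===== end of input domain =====

-- B replaces A's stateful greedy loop (decrementing the surprise budget S in order)
-- with an order-independent count-then-clamp of the two score classes (objective: alternative).

-- ===== PORT A =====
def best_suprising (score : Int) : Int :=
  if score == 0 then 0
  else
    let div3 := PySem.Int.floordiv score 3
    let mod3 := PySem.Int.mod score 3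
    if mod3 == 0 || mod3 == 1 then div3 + 1
    else div3 + 2  -- the 'elif mod3 == 2' branch; mod3 ∈ {0,1,2}, so this is the only remaining case

def best_unsuprising (score : Int) : Int :=
  let div3 := PySem.Int.floordiv score 3
  if PySem.Int.mod score 3 == 0 then div3 else div3 + 1

def max_at_least_p (S : Int) (p : Int) (scores : List Int) : Int :=
  (scores.foldl (fun (st : Int × Int) score =>
      if best_unsuprising score ≥ p then (st.1 + 1, st.2)
      else if best_suprising score ≥ p ∧ st.2 > 0 then (st.1 + 1, st.2 - 1)
      else st) (0, S)).1

-- ===== PORT B =====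
def max_at_least_p_alt (S : Int) (p : Int) (scores : List Int) : Int :=
  let count_sure : Int := (scores.filter (fun score => best_unsuprising score ≥ p)).length
  let count_need : Int := (scores.filter (fun score =>
      best_unsuprising score < p ∧ best_suprising score ≥ p)).length
  count_sure + min count_need (max S 0)

-- ===== PRECONDITION & SPEC =====
def Spec_max_at_least_p (S : Int) (p : Int) (scores : List Int) (out : Int) : Prop := out = max_at_least_p_alt S p scores
instance (S : Int) (p : Int) (scores : List Int) (out : Int) : Decidable (Spec_max_at_least_p S p scores out) := by unfold Spec_max_at_least_p; infer_instance

-- ===== CLAIM (what is proved, stated in full; the proofs are below) =====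
def Claim_equal_max_at_least_p : Prop := ∀ (S : Int) (p : Int) (scores : List Int), Dom_max_at_least_p S p scores → Spec_max_at_least_p S p scores (max_at_least_p S p scores)

-- ===== LEMMAS AND PROOFS =====

-- Loop invariant: the fold from state (count, S) yields count + sure + min need (max S 0).
theorem max_at_least_p_loop (p : Int) (scores : List Int) :
    ∀ (count S : Int),
      (scores.foldl (fun (st : Int × Int) score =>
        if best_unsuprising score ≥ p then (st.1 + 1, st.2)
        else if best_suprising score ≥ p ∧ st.2 > 0 then (st.1 + 1, st.2 - 1)
        else st) (count, S)).1
      = count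
        + ((scores.filter (fun score => best_unsuprising score ≥ p)).length : Int)
        + min ((scores.filter (fun score =>
            best_unsuprising score < p ∧ best_suprising score ≥ p)).length : Int) (max S 0) := by
  induction scores with
  | nil => intro count S; simp
  | cons x xs ih =>
    intro count S
    by_cases h1 : best_unsuprising x ≥ p
    · simp [List.foldl, List.filter, h1, ih, not_lt.mpr h1]
      omega
    · by_cases h2 : best_suprising x ≥ p
      · by_cases h3 : S > 0
        · simp [List.foldl, List.filter, h1, h2, h3, not_le.mp h1, ih]
          omega
        · simp [List.foldl, List.filter, h1, h2, h3, not_le.mp h1, ih]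
          omega
      · simp [List.foldl, List.filter, h1, h2, not_le.mp h1, ih]

-- ===== VERDICT (by name: the statement is the Claim_ definition above) =====
theorem max_at_least_p_spec : Claim_equal_max_at_least_p := by
  intro S p scores _
  unfold Spec_max_at_least_p max_at_least_p max_at_least_p_alt
  simpa using max_at_least_p_loop p scores 0 S
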